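-- pv_equiv track=rewrite | github.com/daniel-reich/ubiquitous-fiesta | HSKvp4qYA2AhDWxn6_17.py | total_points
-- ===== SOURCE A (Python) =====
-- def total_points(guesses, word):
--   score = 0
--   for guess in guesses:
--     count = 0
--     wordr = list(word)
--     for letter in guess:
--       if letter not in wordr:
--         count = 0
--         break
--       if letter in wordr:
--         wordr.remove(letter)
--         count += 1
--     if count == 3:
--       score += 1
--     if count == 4:
--       score += 2
--     if count == 5:
--       score += 3
--     if count == 6:
--       score += 54
--     wordr = list(word)
--   return score
-- ===== SOURCE B (Python) =====
-- _POINTS = {3: 1, 4: 2, 5: 3, 6: 54}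
--
-- def total_points(guesses, word):
--     # Count the word's letters once; judge each guess by comparing letter
--     # counters instead of destructively removing letters from a copy.
--     avail = {}
--     for c in word:
--         avail[c] = avail.get(c, 0) + 1
--     total = 0
--     for g in guesses:
--         need = {}
--         for c in g:
--             need[c] = need.get(c, 0) + 1
--         if all(n <= avail.get(c, 0) for c, n in need.items()):
--             total += _POINTS.get(len(g), 0)
--     return total
-- ===== Notes on version B (the rewrite author's own statement) =====
-- stated objective: alternative
-- what changed: B replaces A's per-guess destructive scan (copying the word and removing each matched letter with break/flag logic) by building the word's letter counter once, comparing each guess's counter against it, and scoring through the length->points dict {3:1,4:2,5:3,6:54} instead of four sequential ifs.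
import Mathlib
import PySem

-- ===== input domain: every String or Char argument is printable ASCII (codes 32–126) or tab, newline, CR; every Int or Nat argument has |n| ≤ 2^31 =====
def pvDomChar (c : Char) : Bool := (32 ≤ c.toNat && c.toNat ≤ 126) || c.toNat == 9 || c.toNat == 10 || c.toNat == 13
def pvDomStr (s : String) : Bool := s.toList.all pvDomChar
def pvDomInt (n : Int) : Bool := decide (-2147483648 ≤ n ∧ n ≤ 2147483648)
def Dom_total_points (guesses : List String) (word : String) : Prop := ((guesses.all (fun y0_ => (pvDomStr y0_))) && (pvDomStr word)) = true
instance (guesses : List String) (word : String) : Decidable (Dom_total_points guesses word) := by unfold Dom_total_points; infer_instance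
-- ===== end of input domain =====

-- B replaces A's per-guess destructive letter-removal loop by comparing letter
-- counters (the word's counter built once), with the length→score map as a dict.

-- ===== PORT A =====
-- inner 'for letter in guess' loop over the mutable copy wordr of word;
-- 'wordr.remove(letter)' is guarded by the membership test, so it removes the
-- first occurrence = List.erase (exact here, never raises)
def pvLoopA (gs : List Char) (wordr : List Char) (count : Int) : Int :=
  match gs with
  | [] => count
  | c :: rest =>
    if c ∉ wordr then 0                              -- 'count = 0; break'
    else pvLoopA rest (wordr.erase c) (count + 1)    -- 'wordr.remove(letter); count += 1'

def total_points (guesses : List String) (word : String) : Int :=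
  guesses.foldl (fun score guess =>
    let count := pvLoopA guess.toList word.toList 0
    let score := if count = 3 then score + 1 else score
    let score := if count = 4 then score + 2 else score
    let score := if count = 5 then score + 3 else score
    if count = 6 then score + 54 else score) 0

-- ===== PORT B =====
-- 'd[c] = d.get(c, 0) + 1' counting loop
def pvCounterB (cs : List Char) : PySem.Dict Char Int :=
  cs.foldl (fun d c => d.insert c (d.getD c 0 + 1)) PySem.Dict.empty

-- _POINTS = {3: 1, 4: 2, 5: 3, 6: 54}
def pvPointsB : PySem.Dict Int Int :=
  ((((PySem.Dict.empty).insert 3 1).insert 4 2).insert 5 3).insert 6 54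

def total_points_alt (guesses : List String) (word : String) : Int :=
  let avail := pvCounterB word.toList
  guesses.foldl (fun total g =>
    let need := pvCounterB g.toList
    if need.items.all (fun p => decide (p.2 ≤ avail.getD p.1 0))
    then total + pvPointsB.getD (PySem.Str.len g) 0
    else total) 0

-- ===== PRECONDITION & SPEC =====
def Spec_total_points (guesses : List String) (word : String) (out : Int) : Prop := out = total_points_alt guesses word
instance (guesses : List String) (word : String) (out : Int) : Decidable (Spec_total_points guesses word out) := by unfold Spec_total_points; infer_instance

-- ===== CLAIM (what is proved, stated in full; the proofs are below) =====
def Claim_equal_total_points : Prop := ∀ (guesses : List String) (word : String), Dom_total_points guesses word → Spec_total_points guesses word (total_points guesses word)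

-- ===== LEMMAS AND PROOFS =====

-- A's removal loop succeeds iff the guess is a letter-submultiset of wordr;
-- on success it returns count + len(guess), on failure 0.
lemma pvLoopA_eq (g : List Char) : ∀ (w : List Char) (k : Int),
    pvLoopA g w k = if ∀ c, g.count c ≤ w.count c then k + g.length else 0 := by
  induction g with
  | nil => intro w k; simp [pvLoopA]
  | cons c rest ih =>
    intro w k
    by_cases hc : c ∈ w
    · have h1 : 0 < w.count c := List.count_pos_iff.mpr hc
      rw [pvLoopA]
      simp only [hc, not_true_eq_false, ite_false]
      rw [ih]
      have hiff : (∀ x, rest.count x ≤ (w.erase c).count x) ↔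
          (∀ x, (c :: rest).count x ≤ w.count x) := by
        constructor
        · intro h x
          have hx := h x
          simp only [List.count_erase, List.count_cons, beq_iff_eq] at hx ⊢
          by_cases hcx : c = x
          · subst hcx; simp at hx ⊢; omega
          · simp [hcx] at hx ⊢; omega
        · intro h x
          have hx := h x
          simp only [List.count_erase, List.count_cons, beq_iff_eq] at hx ⊢
          by_cases hcx : c = x
          · subst hcx; simp at hx ⊢; omega
          · simp [hcx] at hx ⊢; omega
      by_cases hall : ∀ x, (c :: rest).count x ≤ w.count x
      · rw [if_pos (hiff.mpr hall), if_pos hall]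
        simp only [List.length_cons, Nat.cast_add, Nat.cast_one]
        omega
      · rw [if_neg (fun h => hall (hiff.mp h)), if_neg hall]
    · rw [pvLoopA]
      simp only [hc, not_false_eq_true, if_pos]
      have : ¬ ∀ x, (c :: rest).count x ≤ w.count x := by
        intro h
        have hcc := h c
        rw [List.count_cons_self, List.count_eq_zero_of_not_mem hc] at hcc
        omega
      rw [if_neg this]

-- B's counter-comparison test is exactly the letter-submultiset condition.
lemma pvCheckB_eq (g w : List Char) :
    ((pvCounterB g).items.all
        (fun p => decide (p.2 ≤ (pvCounterB w).getD p.1 0)) = true)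
      ↔ (∀ c, g.count c ≤ w.count c) := by
  have hg : pvCounterB g = PySem.Dict.counter g :=
    PySem.Dict.foldl_insert_getD_add_one_eq_counter g
  have hw : pvCounterB w = PySem.Dict.counter w :=
    PySem.Dict.foldl_insert_getD_add_one_eq_counter w
  rw [hg, hw, PySem.Dict.items_counter]
  simp only [List.all_map, List.all_eq_true, PySem.Set.mem_ofList,
    PySem.Dict.getD_counter, Function.comp, decide_eq_true_eq]
  constructor
  · intro h c
    by_cases hcg : c ∈ g
    · exact_mod_cast h c hcg
    · simp [List.count_eq_zero_of_not_mem hcg]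
  · intro h c _
    exact_mod_cast h c

-- A's four sequential ifs on count add exactly _POINTS.get(count, 0).
lemma pvPointsB_getD (k : Int) :
    pvPointsB.getD k 0
      = (if k = 6 then 54 else if k = 5 then 3 else if k = 4 then 2
         else if k = 3 then 1 else 0) := by
  simp [pvPointsB, PySem.Dict.getD_insert]

lemma pvPoints_eq (k s : Int) :
    (let s1 := if k = 3 then s + 1 else s
     let s2 := if k = 4 then s1 + 2 else s1
     let s3 := if k = 5 then s2 + 3 else s2
     if k = 6 then s3 + 54 else s3) = s + pvPointsB.getD k 0 := by
  have hp := pvPointsB_getD k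
  dsimp only
  rw [hp]
  split_ifs <;> omega

lemma pv_step_eq (word : String) (s : Int) (g : String) :
    (let count := pvLoopA g.toList word.toList 0
     let s1 := if count = 3 then s + 1 else s
     let s2 := if count = 4 then s1 + 2 else s1
     let s3 := if count = 5 then s2 + 3 else s2
     if count = 6 then s3 + 54 else s3)
    = (let need := pvCounterB g.toList
       if need.items.all
            (fun p => decide (p.2 ≤ (pvCounterB word.toList).getD p.1 0))
       then s + pvPointsB.getD (PySem.Str.len g) 0
       else s) := by
  rw [pvLoopA_eq]
  by_cases hall : ∀ c, g.toList.count c ≤ word.toList.count c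
  · rw [if_pos hall]
    have hcheck := (pvCheckB_eq g.toList word.toList).mpr hall
    simp only [hcheck, if_pos]
    rw [pvPoints_eq]
    have hlen : PySem.Str.len g = ((0 : Int) + (g.toList.length : Int)) := by
      simp [PySem.Str.len_eq]
    rw [hlen]
  · rw [if_neg hall]
    have hcheck : ¬ ((pvCounterB g.toList).items.all
        (fun p => decide (p.2 ≤ (pvCounterB word.toList).getD p.1 0)) = true) :=
      fun h => hall ((pvCheckB_eq g.toList word.toList).mp h)
    simp only [Bool.not_eq_true] at hcheck
    simp only [hcheck, Bool.false_eq_true, ite_false]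
    norm_num

-- ===== VERDICT (by name: the statement is the Claim_ definition above) =====
theorem total_points_spec : Claim_equal_total_points := by
  intro guesses word _
  show total_points guesses word = total_points_alt guesses word
  unfold total_points total_points_alt
  have hf : (fun (score : Int) (guess : String) =>
      let count := pvLoopA guess.toList word.toList 0
      let score := if count = 3 then score + 1 else score
      let score := if count = 4 then score + 2 else score
      let score := if count = 5 then score + 3 else score
      if count = 6 then score + 54 else score)
    = (fun (total : Int) (g : String) =>
      let need := pvCounterB g.toList
      if need.items.all
           (fun p => decide (p.2 ≤ (pvCounterB word.toList).getD p.1 0))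
      then total + pvPointsB.getD (PySem.Str.len g) 0
      else total) := by
    funext s g
    exact pv_step_eq word s g
  rw [hf]
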